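-- pv_equiv track=rewrite | github.com/kloiselperilla/AdventOfCode2018 | day2/day2.py | two_three_count
-- ===== SOURCE A (Python) =====
-- def two_three_count(list):
--     c2 = 0
--     c3 = 0
--     for i in list:
--         f2 = False
--         f3 = False
--         for c in i:
--             cnt = i.count(c)
--             if cnt == 2:
--                 f2 = True
--             elif cnt == 3:
--                 f3 = True
--             if f2 and f3:
--                 break
--         if f2:
--             c2 += 1
--         if f3:
--             c3 += 1
--     return c2, c3
-- ===== SOURCE B (Python) =====
-- def two_three_count(list):
--     c2 = 0
--     c3 = 0
--     for s in list:
--         f2 = False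
--         f3 = False
--         chars = [c for c in s]
--         while chars:
--             c = chars[0]
--             n = chars.count(c)
--             if n == 2:
--                 f2 = True
--             if n == 3:
--                 f3 = True
--             chars = [x for x in chars if x != c]
--         if f2:
--             c2 += 1
--         if f3:
--             c3 += 1
--     return c2, c3
-- ===== Notes on version B (the rewrite author's own statement) =====
-- stated objective: alternative
-- what changed: B partitions each string's remaining characters by its first character (processing every distinct character exactly once on a shrinking list) instead of A's per-position full-string .count rescans with an elif/break flag machine.
import Mathlib
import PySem

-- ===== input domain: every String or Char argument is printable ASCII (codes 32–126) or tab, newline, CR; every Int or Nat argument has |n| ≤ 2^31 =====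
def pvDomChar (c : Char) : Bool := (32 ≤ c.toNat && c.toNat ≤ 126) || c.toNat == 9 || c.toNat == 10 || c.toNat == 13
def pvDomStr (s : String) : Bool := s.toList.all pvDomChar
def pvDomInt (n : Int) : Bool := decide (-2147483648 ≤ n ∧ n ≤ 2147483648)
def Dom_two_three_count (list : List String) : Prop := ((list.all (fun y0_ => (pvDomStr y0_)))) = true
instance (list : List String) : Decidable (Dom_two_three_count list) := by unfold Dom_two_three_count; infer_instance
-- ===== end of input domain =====

-- B replaces A's per-position full-string .count rescans (with elif/break flag machine) by
-- partitioning the remaining characters on the first one, so each distinct character is handled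
-- once on a shrinking list; objective: alternative.

-- ===== PORT A =====
-- Inner loop of A over the characters of i; `i.count(c)` for the single character c is the
-- number of occurrences of c in i, ported exactly as List.count on i's characters.
def pyLoopA (s : List Char) : List Char → Bool → Bool → Bool × Bool
  | [], f2, f3 => (f2, f3)
  | c :: rest, f2, f3 =>
    let cnt := s.count c
    let f2' := if cnt = 2 then true else f2
    let f3' := if cnt = 2 then f3 else if cnt = 3 then true else f3
    if f2' && f3' then (f2', f3') else pyLoopA s rest f2' f3'

def two_three_count (list : List String) : Int × Int :=
  list.foldl (fun acc i =>
    let fs := pyLoopA i.toList i.toList false false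
    ((if fs.1 then acc.1 + 1 else acc.1), (if fs.2 then acc.2 + 1 else acc.2))) (0, 0)

-- ===== PORT B =====
-- Inner while-loop of B: count the first remaining character, set the flags, drop all its copies.
def pyLoopB : List Char → Bool → Bool → Bool × Bool
  | [], f2, f3 => (f2, f3)
  | c :: rest, f2, f3 =>
    let n := (c :: rest).count c
    pyLoopB ((c :: rest).filter (· != c)) (if n = 2 then true else f2) (if n = 3 then true else f3)
termination_by l => l.length
decreasing_by
  simp only [List.filter_cons, bne_self_eq_false, Bool.false_eq_true, if_false, List.length_cons]
  exact Nat.lt_succ_of_le (List.length_filter_le _ _)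

def two_three_count_alt (list : List String) : Int × Int :=
  list.foldl (fun acc s =>
    let fs := pyLoopB s.toList false false
    ((if fs.1 then acc.1 + 1 else acc.1), (if fs.2 then acc.2 + 1 else acc.2))) (0, 0)

-- ===== PRECONDITION & SPEC =====
def Spec_two_three_count (list : List String) (out : Int × Int) : Prop := out = two_three_count_alt list
instance (list : List String) (out : Int × Int) : Decidable (Spec_two_three_count list out) := by unfold Spec_two_three_count; infer_instance

-- ===== CLAIM (what is proved, stated in full; the proofs are below) =====
def Claim_equal_two_three_count : Prop := ∀ (list : List String), Dom_two_three_count list → Spec_two_three_count list (two_three_count list)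

-- ===== LEMMAS AND PROOFS =====
-- A's loop computes, for each flag, "some character of the string occurs exactly k times".
theorem pyLoopA_eq (s : List Char) (l : List Char) (f2 f3 : Bool) :
    pyLoopA s l f2 f3 =
      (f2 || l.any (fun c => s.count c == 2), f3 || l.any (fun c => s.count c == 3)) := by
  induction l generalizing f2 f3 with
  | nil => simp [pyLoopA]
  | cons c rest ih =>
    simp only [pyLoopA, List.any_cons]
    by_cases h2 : s.count c = 2
    · cases f3
      · rw [if_pos h2, if_pos h2, Bool.and_false, if_neg (by simp), ih]
        simp [h2]
      · rw [if_pos h2, if_pos h2, Bool.and_true, if_pos rfl]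
        simp [h2]
    · by_cases h3 : s.count c = 3
      · cases f2
        · rw [if_neg h2, if_neg h2, if_pos h3, Bool.false_and, if_neg (by simp), ih]
          simp [h3]
        · rw [if_neg h2, if_neg h2, if_pos h3, Bool.true_and, if_pos rfl]
          simp [h3]
      · cases f2 <;> cases f3
        · rw [if_neg h2, if_neg h2, if_neg h3, Bool.false_and, if_neg (by simp), ih]
          simp [beq_eq_false_iff_ne.mpr h2, beq_eq_false_iff_ne.mpr h3]
        · rw [if_neg h2, if_neg h2, if_neg h3, Bool.false_and, if_neg (by simp), ih]
          simp [beq_eq_false_iff_ne.mpr h2, beq_eq_false_iff_ne.mpr h3]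
        · rw [if_neg h2, if_neg h2, if_neg h3, Bool.true_and, if_neg (by simp), ih]
          simp [beq_eq_false_iff_ne.mpr h2, beq_eq_false_iff_ne.mpr h3]
        · rw [if_neg h2, if_neg h2, if_neg h3, Bool.true_and, if_pos rfl]
          simp

-- Counts of the characters kept by the partition step are unchanged by it.
theorem count_filter_ne (x c : Char) (l : List Char) (h : x ≠ c) :
    (l.filter (· != c)).count x = l.count x := by
  rw [List.count_filter]; simp [h]

-- One partition step of B preserves "some remaining character occurs exactly k times".
theorem any_count_step (c : Char) (rest : List Char) (k : Nat) :
    (c :: rest).any (fun x => (c :: rest).count x == k) =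
      (((c :: rest).count c == k) ||
        ((c :: rest).filter (· != c)).any
          (fun x => ((c :: rest).filter (· != c)).count x == k)) := by
  rw [Bool.eq_iff_iff]
  simp only [List.any_eq_true, beq_iff_eq, List.mem_filter, List.any_cons, Bool.or_eq_true,
    List.mem_cons, bne_iff_ne, ne_eq]
  constructor
  · rintro (h | ⟨x, hx, hcnt⟩)
    · exact Or.inl h
    · by_cases hxc : x = c
      · subst hxc; exact Or.inl hcnt
      · exact Or.inr ⟨x, ⟨Or.inr hx, hxc⟩, by rw [count_filter_ne x c _ hxc]; exact hcnt⟩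
  · rintro (h | ⟨x, ⟨hx, hxc⟩, hcnt⟩)
    · exact Or.inl h
    · rw [count_filter_ne x c _ hxc] at hcnt
      rcases hx with rfl | hx
      · exact Or.inl hcnt
      · exact Or.inr ⟨x, hx, hcnt⟩

-- Merging a flag update "if cnt = k: flag = True" into a disjunction of flags.
theorem if_or (m k : Nat) (f x : Bool) :
    ((if m = k then true else f) || x) = (f || ((m == k) || x)) := by
  by_cases h : m = k
  · simp [h, Bool.or_comm]
  · simp [h, beq_eq_false_iff_ne.mpr h]

-- B's loop computes the same two flags.
theorem pyLoopB_eq (l : List Char) (f2 f3 : Bool) :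
    pyLoopB l f2 f3 =
      (f2 || l.any (fun x => l.count x == 2), f3 || l.any (fun x => l.count x == 3)) := by
  induction l, f2, f3 using pyLoopB.induct with
  | case1 f2 f3 => simp [pyLoopB]
  | case2 c rest f2 f3 n ih =>
    rw [pyLoopB]
    simp only [show n = (c :: rest).count c from rfl, dite_eq_ite] at ih
    rw [ih, any_count_step c rest 2, any_count_step c rest 3, Prod.mk.injEq]
    exact ⟨if_or _ _ _ _, if_or _ _ _ _⟩

-- On each string both inner loops produce the same flag pair.
theorem flags_eq (s : List Char) : pyLoopA s s false false = pyLoopB s false false := by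
  rw [pyLoopA_eq, pyLoopB_eq]

-- ===== VERDICT (by name: the statement is the Claim_ definition above) =====
theorem two_three_count_spec : Claim_equal_two_three_count := by
  intro list _
  unfold Spec_two_three_count two_three_count two_three_count_alt
  simp only [flags_eq]
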